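-- pv_equiv track=rewrite | github.com/secret-algorithm-study/algorithm-study | 시연/완전탐색/한윤정_2422.py | solve
-- ===== SOURCE A (Python) =====
-- def solve(N, M, bad_combinations):
--     bad = [[False] * (N + 1) for _ in range(N + 1)]
--     for a, b in bad_combinations:
--         bad[a][b] = bad[b][a] = True
--
--     def backtrack(start, depth, combination):
--         if depth == 3:
--             return 1
--
--         total = 0
--         for i in range(start, N + 1):
--             if all(not bad[i][j] for j in combination):
--                 combination.append(i)
--                 total += backtrack(i + 1, depth + 1, combination)
--                 combination.pop()
--         return total
--
--     return backtrack(1, 0, [])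
-- ===== SOURCE B (Python) =====
-- def solve(N, M, bad_combinations):
--     # Count 3-subsets of {1..N} with no forbidden pair, without enumerating triples:
--     # for each allowed pair i<j, the number of valid thirds k>j is computed by
--     # inclusion-exclusion from per-vertex lists of larger forbidden partners.
--     bad = [[False] * (N + 1) for _ in range(N + 1)]
--     for a, b in bad_combinations:
--         bad[a][b] = bad[b][a] = True
--     up = [[w for w in range(v + 1, N + 1) if bad[v][w]] for v in range(N + 1)]
--     total = 0
--     for i in range(1, N + 1):
--         for j in range(i + 1, N + 1):
--             if bad[i][j]:
--                 continue
--             ai = sum(1 for v in up[i] if v > j)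
--             both = sum(1 for v in up[i] if v > j and bad[j][v])
--             total += (N - j) - ai - len(up[j]) + both
--     return total
-- ===== Notes on version B (the rewrite author's own statement) =====
-- stated objective: alternative
-- what changed: B drops A's recursive depth-3 backtracking over candidate triples and instead, after building the forbidden-pair matrix once, loops over allowed pairs i<j and counts the valid third elements arithmetically by inclusion-exclusion from precomputed per-vertex lists of larger forbidden partners, eliminating the innermost enumeration entirely.
import Mathlib
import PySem

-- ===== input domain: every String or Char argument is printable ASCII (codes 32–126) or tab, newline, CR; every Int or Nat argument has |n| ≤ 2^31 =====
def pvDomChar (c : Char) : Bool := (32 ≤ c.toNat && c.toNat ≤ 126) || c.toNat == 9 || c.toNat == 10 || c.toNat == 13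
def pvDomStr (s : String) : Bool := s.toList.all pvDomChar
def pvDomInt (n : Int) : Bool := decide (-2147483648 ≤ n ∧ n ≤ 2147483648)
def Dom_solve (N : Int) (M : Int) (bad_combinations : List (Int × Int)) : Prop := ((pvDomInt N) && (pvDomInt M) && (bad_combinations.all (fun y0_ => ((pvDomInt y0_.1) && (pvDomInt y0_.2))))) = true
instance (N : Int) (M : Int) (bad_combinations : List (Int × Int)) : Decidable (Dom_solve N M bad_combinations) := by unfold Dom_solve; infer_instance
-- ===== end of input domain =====

-- B replaces A's depth-3 recursive backtracking by a pair loop whose innermost level is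
-- computed arithmetically by inclusion-exclusion (objective: alternative).

-- ===== PORT A =====
-- Python list indexing on a list of length N+1: a negative index i reads entry i + (N+1)
def pvWrap (N i : Int) : Int := if i < 0 then i + (N + 1) else i

-- The (N+1)x(N+1) boolean matrix 'bad' (built identically by both Pythons) is
-- represented by its lookup function (exact on Pre_, where every written index is in
-- range -(N+1)..N — Python wraps the negative ones — and reads use indices in 0..N).
def pvBadFun (N : Int) (pairs : List (Int × Int)) : Int → Int → Bool :=
  pairs.foldl
    (fun f p => fun x y =>
      if (x = pvWrap N p.1 ∧ y = pvWrap N p.2) ∨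
          (x = pvWrap N p.2 ∧ y = pvWrap N p.1) then true
      else f x y)
    (fun _ _ => false)

-- backtrack(start, depth, combination); 'fuel' only makes the recursion structural
-- (depth increases by 1 per level and stops at 3, so fuel 3 is never exhausted).
def pvBacktrack (bad : Int → Int → Bool) (N : Int) :
    Nat → Int → Int → List Int → Int
  | fuel, start, depth, comb =>
    if depth = 3 then 1
    else
      match fuel with
      | 0 => 0
      | Nat.succ f =>
        (PySem.List.pyRange start (N + 1) 1).foldl
          (fun total i =>
            if comb.all (fun j => !(bad i j)) then
              total + pvBacktrack bad N f (i + 1) (depth + 1) (comb ++ [i])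
            else total)
          0

def solve (N : Int) (M : Int) (bad_combinations : List (Int × Int)) : Int :=
  pvBacktrack (pvBadFun N bad_combinations) N 3 1 0 []

-- ===== PORT B =====
-- up[v] = [w for w in range(v+1, N+1) if bad[v][w]]; the Python list indexed by
-- v in 0..N is represented as the function of v (all reads are at 0..N).
def pvUp (N : Int) (pairs : List (Int × Int)) (v : Int) : List Int :=
  (PySem.List.pyRange (v + 1) (N + 1) 1).filter (fun w => pvBadFun N pairs v w)

def solve_alt (N : Int) (M : Int) (bad_combinations : List (Int × Int)) : Int :=
  (PySem.List.pyRange 1 (N + 1) 1).foldl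
    (fun total i =>
      (PySem.List.pyRange (i + 1) (N + 1) 1).foldl
        (fun total j =>
          if pvBadFun N bad_combinations i j then total
          else
            let ai : Int :=
              ((pvUp N bad_combinations i).filter (fun v => decide (v > j))).length
            let both : Int :=
              ((pvUp N bad_combinations i).filter
                (fun v => decide (v > j) && pvBadFun N bad_combinations j v)).length
            total + ((N - j) - ai - ((pvUp N bad_combinations j).length : Int) + both))
        total)
    0

-- ===== PRECONDITION & SPEC =====
-- Pre_ is exactly where the Python A returns: every pair component is a valid Python
-- index into a list of length N+1, i.e. in -(N+1)..N (outside it, A raises IndexError).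
def Pre_solve (N : Int) (M : Int) (bad_combinations : List (Int × Int)) : Prop :=
  ∀ p ∈ bad_combinations,
    -(N + 1) ≤ p.1 ∧ p.1 ≤ N ∧ -(N + 1) ≤ p.2 ∧ p.2 ≤ N

instance (N : Int) (M : Int) (bad_combinations : List (Int × Int)) : Decidable (Pre_solve N M bad_combinations) := by unfold Pre_solve; infer_instance

def pvWitness_solve : Int × Int × (List (Int × Int)) := (4, 3, [(1, 2), (2, 3), (0, 4)])

def Spec_solve (N : Int) (M : Int) (bad_combinations : List (Int × Int)) (out : Int) : Prop := out = solve_alt N M bad_combinations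
instance (N : Int) (M : Int) (bad_combinations : List (Int × Int)) (out : Int) : Decidable (Spec_solve N M bad_combinations out) := by unfold Spec_solve; infer_instance

-- ===== CLAIM (what is proved, stated in full; the proofs are below) =====
def Claim_equal_solve : Prop := ∀ (N : Int) (M : Int) (bad_combinations : List (Int × Int)), Dom_solve N M bad_combinations → Pre_solve N M bad_combinations → Spec_solve N M bad_combinations (solve N M bad_combinations)

-- ===== LEMMAS AND PROOFS =====

-- generic fold shapes -------------------------------------------------------

theorem pv_foldl_if_add {α : Type} (p : α → Bool) (F : α → Int) :
    ∀ (l : List α) (init : Int),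
      l.foldl (fun acc x => if p x then acc + F x else acc) init
        = init + ((l.filter p).map F).sum := by
  intro l
  induction l with
  | nil => intro init; simp
  | cons a t ih =>
    intro init
    by_cases h : p a = true <;> simp [h, ih] <;> ring

theorem pv_foldl_skip_add {α : Type} (p : α → Bool) (F : α → Int) :
    ∀ (l : List α) (init : Int),
      l.foldl (fun acc x => if p x then acc else acc + F x) init
        = init + ((l.filter (fun x => !p x)).map F).sum := by
  intro l
  induction l with
  | nil => intro init; simp
  | cons a t ih =>
    intro init
    by_cases h : p a = true <;> simp [h, ih] <;> ring

theorem pv_foldl_add {α : Type} (F : α → Int) :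
    ∀ (l : List α) (init : Int),
      l.foldl (fun acc x => acc + F x) init = init + (l.map F).sum := by
  intro l
  induction l with
  | nil => intro init; simp
  | cons a t ih => intro init; simp [ih]; ring

-- counting ------------------------------------------------------------------

theorem pv_inclusion_exclusion (p q : Int → Bool) :
    ∀ (L : List Int),
      (L.filter (fun k => !p k && !q k)).length + (L.filter p).length
          + (L.filter q).length
        = L.length + (L.filter (fun k => p k && q k)).length := by
  intro L
  induction L with
  | nil => simp
  | cons a t ih =>
    by_cases hp : p a = true <;> by_cases hq : q a = true <;>
      simp [hp, hq] <;> omega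

theorem pv_count_transfer (L1 L2 : List Int) (p1 p2 : Int → Bool)
    (h1 : L1.Nodup) (h2 : L2.Nodup)
    (hm : ∀ x, (x ∈ L1 ∧ p1 x = true) ↔ (x ∈ L2 ∧ p2 x = true)) :
    (L1.filter p1).length = (L2.filter p2).length := by
  apply List.Perm.length_eq
  rw [List.perm_ext_iff_of_nodup (h1.filter _) (h2.filter _)]
  intro x
  simp only [List.mem_filter]
  exact hm x

-- characterization of the matrix --------------------------------------------

-- 'pair (a, b) forbids the unordered pair {x, y}'
def pvHit (a b x y : Int) : Prop := (x = a ∧ y = b) ∨ (x = b ∧ y = a)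

theorem pvHit_symm (a b x y : Int) : pvHit a b x y ↔ pvHit a b y x := by
  unfold pvHit; tauto

theorem pvBadFun_aux (N : Int) (l : List (Int × Int)) (f0 : Int → Int → Bool)
    (x y : Int) :
    (l.foldl
        (fun f p => fun x y =>
          if (x = pvWrap N p.1 ∧ y = pvWrap N p.2) ∨
              (x = pvWrap N p.2 ∧ y = pvWrap N p.1) then true
          else f x y)
        f0) x y = true
      ↔ (∃ p ∈ l, pvHit (pvWrap N p.1) (pvWrap N p.2) x y) ∨ f0 x y = true := by
  induction l generalizing f0 with
  | nil => simp
  | cons a t ih =>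
    simp only [List.foldl_cons, ih, List.mem_cons, pvHit]
    by_cases h : (x = pvWrap N a.1 ∧ y = pvWrap N a.2) ∨
        (x = pvWrap N a.2 ∧ y = pvWrap N a.1) <;> simp [h] <;> aesop

theorem pvBadFun_iff (N : Int) (pairs : List (Int × Int)) (x y : Int) :
    pvBadFun N pairs x y = true
      ↔ ∃ p ∈ pairs, pvHit (pvWrap N p.1) (pvWrap N p.2) x y := by
  unfold pvBadFun
  rw [pvBadFun_aux]
  simp

theorem pvBadFun_symm (N : Int) (pairs : List (Int × Int)) (x y : Int) :
    pvBadFun N pairs x y = pvBadFun N pairs y x := by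
  rw [Bool.eq_iff_iff, pvBadFun_iff, pvBadFun_iff]
  constructor <;> rintro ⟨p, hp, hh⟩ <;>
    exact ⟨p, hp, (pvHit_symm _ _ _ _).mp hh⟩

-- characterization of B's up-lists ------------------------------------------

theorem pvUp_mem (N : Int) (pairs : List (Int × Int)) (v x : Int) :
    x ∈ pvUp N pairs v ↔ (v < x ∧ x ≤ N) ∧ pvBadFun N pairs v x = true := by
  unfold pvUp
  rw [List.mem_filter, PySem.List.mem_pyRange_one]
  constructor <;> rintro ⟨⟨h1, h2⟩, h3⟩ <;> exact ⟨⟨by omega, by omega⟩, h3⟩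

theorem pvUp_nodup (N : Int) (pairs : List (Int × Int)) (v : Int) :
    (pvUp N pairs v).Nodup := by
  unfold pvUp
  exact (PySem.List.nodup_pyRange_one _ _).filter _

-- characterization of A ------------------------------------------------------

theorem pvBacktrack3 (bad : Int → Int → Bool) (N : Int) (f : Nat) (s : Int)
    (c : List Int) : pvBacktrack bad N f s 3 c = 1 := by
  unfold pvBacktrack; simp

theorem pvBacktrack2 (bad : Int → Int → Bool) (N s : Int) (c : List Int) :
    pvBacktrack bad N 1 s 2 c
      = (((PySem.List.pyRange s (N + 1) 1).filter
            (fun i => c.all (fun j => !(bad i j)))).length : Int) := by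
  unfold pvBacktrack
  simp only [show ¬((2 : Int) = 3) by decide, if_neg, not_false_iff]
  simp only [show (2 : Int) + 1 = 3 by decide, pvBacktrack3]
  rw [pv_foldl_if_add]
  simp

theorem pvBacktrack1 (bad : Int → Int → Bool) (N s : Int) (c : List Int) :
    pvBacktrack bad N 2 s 1 c
      = (((PySem.List.pyRange s (N + 1) 1).filter
            (fun i => c.all (fun j => !(bad i j)))).map
          (fun i =>
            (((PySem.List.pyRange (i + 1) (N + 1) 1).filter
                (fun k => (c ++ [i]).all (fun j => !(bad k j)))).length : Int))).sum := by
  unfold pvBacktrack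
  simp only [show ¬((1 : Int) = 3) by decide, if_neg, not_false_iff]
  simp only [show (1 : Int) + 1 = 2 by decide, pvBacktrack2]
  rw [pv_foldl_if_add]
  simp

theorem pv_solveA (N M : Int) (pairs : List (Int × Int)) :
    solve N M pairs =
      ((PySem.List.pyRange 1 (N + 1) 1).map (fun i =>
        (((PySem.List.pyRange (i + 1) (N + 1) 1).filter
            (fun j => !(pvBadFun N pairs j i))).map
          (fun j =>
            (((PySem.List.pyRange (j + 1) (N + 1) 1).filter
                (fun k => !(pvBadFun N pairs k i) && !(pvBadFun N pairs k j))).length : Int))).sum)).sum := by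
  unfold solve
  unfold pvBacktrack
  simp only [show ¬((0 : Int) = 3) by decide, if_neg, not_false_iff]
  simp only [show (0 : Int) + 1 = 1 by decide, List.all_nil, if_pos,
    List.nil_append, pvBacktrack1]
  rw [pv_foldl_add]
  simp [List.all_cons, List.all_nil, Bool.and_true]

-- characterization of B ------------------------------------------------------

theorem pv_solveB (N M : Int) (pairs : List (Int × Int)) :
    solve_alt N M pairs =
      ((PySem.List.pyRange 1 (N + 1) 1).map (fun i =>
        (((PySem.List.pyRange (i + 1) (N + 1) 1).filter
            (fun j => !(pvBadFun N pairs i j))).map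
          (fun j =>
            (N - j)
              - (((pvUp N pairs i).filter (fun v => decide (v > j))).length : Int)
              - (((pvUp N pairs j).length : Int))
              + (((pvUp N pairs i).filter
                    (fun v => decide (v > j) && pvBadFun N pairs j v)).length : Int))).sum)).sum := by
  unfold solve_alt
  simp only [pv_foldl_skip_add, pv_foldl_add, zero_add]

-- the per-pair inclusion-exclusion identity ----------------------------------

theorem pv_core (N : Int) (pairs : List (Int × Int))
    (i j : Int) (hi : 1 ≤ i) (hij : i < j) (hjN : j ≤ N) :
    (((PySem.List.pyRange (j + 1) (N + 1) 1).filter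
        (fun k => !(pvBadFun N pairs k i) && !(pvBadFun N pairs k j))).length : Int)
      = (N - j)
          - (((pvUp N pairs i).filter (fun v => decide (v > j))).length : Int)
          - (((pvUp N pairs j).length : Int))
          + (((pvUp N pairs i).filter
                (fun v => decide (v > j) && pvBadFun N pairs j v)).length : Int) := by
  have hIE := pv_inclusion_exclusion (fun k => pvBadFun N pairs k i)
    (fun k => pvBadFun N pairs k j) (PySem.List.pyRange (j + 1) (N + 1) 1)
  have hLnd : (PySem.List.pyRange (j + 1) (N + 1) 1).Nodup :=
    PySem.List.nodup_pyRange_one _ _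
  have hLen : (PySem.List.pyRange (j + 1) (N + 1) 1).length = (N - j).toNat := by
    rw [PySem.List.length_pyRange_one]
    congr 1
    ring
  have hA : ((PySem.List.pyRange (j + 1) (N + 1) 1).filter
        (fun k => pvBadFun N pairs k i)).length
      = ((pvUp N pairs i).filter (fun v => decide (v > j))).length := by
    apply pv_count_transfer _ _ _ _ hLnd (pvUp_nodup N pairs i)
    intro x
    rw [PySem.List.mem_pyRange_one, pvUp_mem, decide_eq_true_iff]
    constructor
    · rintro ⟨⟨hx1, hx2⟩, hbad⟩
      rw [pvBadFun_symm] at hbad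
      exact ⟨⟨⟨by omega, by omega⟩, hbad⟩, by omega⟩
    · rintro ⟨⟨⟨h1, h2⟩, hbad⟩, hxj⟩
      rw [pvBadFun_symm] at hbad
      exact ⟨⟨by omega, by omega⟩, hbad⟩
  have hB : ((PySem.List.pyRange (j + 1) (N + 1) 1).filter
        (fun k => pvBadFun N pairs k j)).length
      = (pvUp N pairs j).length := by
    have : (pvUp N pairs j).length = ((pvUp N pairs j).filter (fun _ => true)).length := by
      simp
    rw [this]
    apply pv_count_transfer _ _ _ _ hLnd (pvUp_nodup N pairs j)
    intro x
    rw [PySem.List.mem_pyRange_one, pvUp_mem]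
    constructor
    · rintro ⟨⟨hx1, hx2⟩, hbad⟩
      rw [pvBadFun_symm] at hbad
      exact ⟨⟨⟨by omega, by omega⟩, hbad⟩, rfl⟩
    · rintro ⟨⟨⟨h1, h2⟩, hbad⟩, -⟩
      rw [pvBadFun_symm] at hbad
      exact ⟨⟨by omega, by omega⟩, hbad⟩
  have hC : ((PySem.List.pyRange (j + 1) (N + 1) 1).filter
        (fun k => pvBadFun N pairs k i && pvBadFun N pairs k j)).length
      = ((pvUp N pairs i).filter
          (fun v => decide (v > j) && pvBadFun N pairs j v)).length := by
    apply pv_count_transfer _ _ _ _ hLnd (pvUp_nodup N pairs i)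
    intro x
    simp only [Bool.and_eq_true, decide_eq_true_iff, pvUp_mem]
    rw [PySem.List.mem_pyRange_one]
    constructor
    · rintro ⟨⟨hx1, hx2⟩, hbi, hbj⟩
      rw [pvBadFun_symm] at hbi hbj
      exact ⟨⟨⟨by omega, by omega⟩, hbi⟩, by omega, hbj⟩
    · rintro ⟨⟨⟨h1, h2⟩, hbi⟩, hxj, hbj⟩
      rw [pvBadFun_symm] at hbi hbj
      exact ⟨⟨by omega, by omega⟩, hbi, hbj⟩
  omega

-- ===== VERDICT (by name: the statement is the Claim_ definition above) =====
theorem solve_spec : Claim_equal_solve := by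
  intro N M pairs hDom hPre
  unfold Spec_solve
  rw [pv_solveA, pv_solveB]
  refine congrArg List.sum (List.map_congr_left ?_)
  intro i hi
  rcases (PySem.List.mem_pyRange_one).mp hi with ⟨hi1, hi2⟩
  have hfil :
      (PySem.List.pyRange (i + 1) (N + 1) 1).filter
          (fun j => !(pvBadFun N pairs j i))
        = (PySem.List.pyRange (i + 1) (N + 1) 1).filter
            (fun j => !(pvBadFun N pairs i j)) := by
    apply List.filter_congr
    intro j hj
    rw [pvBadFun_symm]
  rw [hfil]
  refine congrArg List.sum (List.map_congr_left ?_)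
  intro j hj
  rcases List.mem_filter.mp hj with ⟨hjr, -⟩
  rcases (PySem.List.mem_pyRange_one).mp hjr with ⟨hj1, hj2⟩
  exact pv_core N pairs i j (by omega) (by omega) (by omega)
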